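-- pv_equiv track=rewrite | github.com/RaiiDeNx7/Roman-Calculator | src/Roman_Calculator/stringManipulation.py | split_operators
-- ===== SOURCE A (Python) =====
-- def split_operators(expression):
--
--     # list of roman numerals that we want to seperate from operators
--     numbers = "IVXLCDM"
--
--     # initialize empty list
--     newList = []
--
--     # initialize empty string
--     lastNumber = ""
--
--     # Loop through characters in the string
--     for char in expression:
--
--         # If a roman numeral appears
--         if char in numbers:
--
--             # Add to the roman numeral to the string
--             lastNumber += char
--
--
--             # If a roman numeral doesn't appear
--         else:
--
--             # if lastNumber is not empty
--             if lastNumber: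
--
--                 # if lastNumber has a numeral, it appends to newList list
--                 newList.append(lastNumber)
--
--                 # LastNumber is reset to empty
--                 lastNumber = ""
--
--             # if character is non-empty, it is appended to the newList list
--             if char:
--                 newList.append(char)
--
--     # Checks if unappended lastNumber (expression ends in number)
--     if lastNumber:
--
--         # Append final number to newList
--         newList.append(lastNumber)
--
--     # return the list with seperated operators
--     return newList
-- ===== SOURCE B (Python) =====
-- from itertools import groupby
--
-- def split_operators(expression):
--     numbers = "IVXLCDM"
--     tokens = []
--     for is_num, grp in groupby(expression, key=lambda c: c in numbers):
--         if is_num: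
--             tokens.append("".join(grp))
--         else:
--             tokens.extend(grp)
--     return tokens
-- ===== Notes on version B (the rewrite author's own statement) =====
-- stated objective: idiomatic
-- what changed: Replaces the hand-maintained pending-numeral accumulator with itertools.groupby partitioning the string into maximal same-class runs: numeral runs are joined into one token, non-numeral runs are emitted character by character.
import Mathlib
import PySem

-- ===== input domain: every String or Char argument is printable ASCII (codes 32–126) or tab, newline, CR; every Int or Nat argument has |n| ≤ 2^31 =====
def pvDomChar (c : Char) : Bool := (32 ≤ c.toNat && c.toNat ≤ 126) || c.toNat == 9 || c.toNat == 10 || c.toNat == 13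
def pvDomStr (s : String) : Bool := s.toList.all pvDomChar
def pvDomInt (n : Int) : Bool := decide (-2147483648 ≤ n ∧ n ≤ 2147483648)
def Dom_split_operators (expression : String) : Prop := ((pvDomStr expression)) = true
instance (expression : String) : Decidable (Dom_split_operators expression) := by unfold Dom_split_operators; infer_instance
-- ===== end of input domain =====

-- B replaces A's pending-numeral accumulator loop with grouping into maximal same-class runs (itertools.groupby); idiomatic, same cost.

-- ===== PORT A =====
-- loop state: newList (accumulated tokens) and lastNumber (pending numeral run, kept as List Char;
-- `lastNumber += char` is appending the char).  `if char:` is always true for a character of the string.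
def splitGoA : List Char → List String → List Char → List String
  | [], newList, lastNumber =>
      if lastNumber ≠ [] then newList ++ [String.ofList lastNumber] else newList
  | c :: cs, newList, lastNumber =>
      if "IVXLCDM".toList.contains c then
        splitGoA cs newList (lastNumber ++ [c])
      else
        let nl1 := if lastNumber ≠ [] then newList ++ [String.ofList lastNumber] else newList
        splitGoA cs (nl1 ++ [String.ofList [c]]) []

def split_operators (expression : String) : List String :=
  splitGoA expression.toList [] []

-- ===== PORT B =====
def isRomanB (c : Char) : Bool := "IVXLCDM".toList.contains c

-- groupby into maximal same-class runs: a numeral run becomes one joined token,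
-- a non-numeral group yields its characters one by one.
def altGo : List Char → List String
  | [] => []
  | c :: cs =>
      if isRomanB c then
        String.ofList (c :: cs.takeWhile isRomanB) :: altGo (cs.dropWhile isRomanB)
      else
        String.ofList [c] :: altGo cs
termination_by cs => cs.length
decreasing_by
  · simpa using Nat.lt_succ_of_le (List.length_dropWhile_le _ _)
  · simp

def split_operators_alt (expression : String) : List String :=
  altGo expression.toList

-- ===== PRECONDITION & SPEC =====
def Spec_split_operators (expression : String) (out : List String) : Prop := out = split_operators_alt expression
instance (expression : String) (out : List String) : Decidable (Spec_split_operators expression out) := by unfold Spec_split_operators; infer_instance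

-- ===== CLAIM (what is proved, stated in full; the proofs are below) =====
def Claim_equal_split_operators : Prop := ∀ (expression : String), Dom_split_operators expression → Spec_split_operators expression (split_operators expression)

-- ===== LEMMAS AND PROOFS =====

theorem splitGoA_append (cs : List Char) : ∀ (nl : List String) (last : List Char),
    splitGoA cs nl last = nl ++ splitGoA cs [] last := by
  induction cs with
  | nil => intro nl last; simp [splitGoA]; split_ifs <;> simp
  | cons c cs ih =>
      intro nl last
      simp only [splitGoA]
      split_ifs with h hl
      · exact ih nl _
      · rw [ih (nl ++ [String.ofList last] ++ [String.ofList [c]]) [],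
            ih ([] ++ [String.ofList last] ++ [String.ofList [c]]) []]
        simp
      · rw [ih (nl ++ [String.ofList [c]]) [], ih ([] ++ [String.ofList [c]]) []]
        simp

theorem splitGoA_alt (cs : List Char) : ∀ (last : List Char),
    splitGoA cs [] last =
      if last = [] then altGo cs
      else String.ofList (last ++ cs.takeWhile isRomanB) :: altGo (cs.dropWhile isRomanB) := by
  induction cs with
  | nil =>
      intro last
      by_cases hl : last = [] <;> simp [splitGoA, altGo, hl]
  | cons c cs ih =>
      intro last
      simp only [splitGoA]
      by_cases h : isRomanB c
      · rw [if_pos (show "IVXLCDM".toList.contains c = true from h), ih (last ++ [c])]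
        by_cases hl : last = []
        · subst hl
          simp [altGo, h]
        · have hne : last ++ [c] ≠ [] := by simp
          rw [if_neg hne, if_neg hl]
          simp [altGo, h, List.takeWhile_cons, List.dropWhile_cons]
      · rw [if_neg (show ¬("IVXLCDM".toList.contains c = true) from h)]
        by_cases hl : last = []
        · subst hl
          rw [if_neg (by simp : ¬(([] : List Char) ≠ []))]
          rw [splitGoA_append, ih []]
          simp [altGo, h]
        · rw [if_pos (by simpa using hl : last ≠ []), if_neg hl]
          rw [splitGoA_append, ih []]
          simp [altGo, h, List.takeWhile_cons, List.dropWhile_cons]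

-- ===== VERDICT (by name: the statement is the Claim_ definition above) =====
theorem split_operators_spec : Claim_equal_split_operators := by
  intro e _
  unfold Spec_split_operators split_operators split_operators_alt
  rw [splitGoA_alt]
  simp
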